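-- pv_equiv track=rewrite | github.com/ZeroFla/Telegram_bot_news_catania | bot/handlers.py | aggiorna_selezione
-- ===== SOURCE A (Python) =====
-- from typing import Any, Dict, List, cast
--
-- def aggiorna_selezione(
--     lista_target: List[str],
--     data_key: str,
--     dizionario: Dict[str, str],
--     chiave_tutti: str,
--     prefisso: str = "",
-- ) -> List[str]:
--     if data_key == chiave_tutti:
--         tutti_i_valori = []
--         for k, v in dizionario.items():
--             if k == chiave_tutti:
--                 continue
--             valore_db = f"{prefisso}{v}" if prefisso else v
--             tutti_i_valori.append(valore_db)
--
--         elementi_gia_presenti = [x for x in tutti_i_valori if x in lista_target]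
--
--         if len(elementi_gia_presenti) == len(tutti_i_valori):
--             for item in tutti_i_valori:
--                 if item in lista_target:
--                     lista_target.remove(item)
--         else:
--             for item in tutti_i_valori:
--                 if item not in lista_target:
--                     lista_target.append(item)
--         return lista_target
--     else:
--         valore = f"{prefisso}{dizionario[data_key]}" if prefisso else dizionario[data_key]
--         if valore in lista_target:
--             lista_target.remove(valore)
--         else:
--             lista_target.append(valore)
--         return lista_target
-- ===== SOURCE B (Python) =====
-- from typing import Dict, List
--
--
-- def aggiorna_selezione(
--     lista_target: List[str],
--     data_key: str,
--     dizionario: Dict[str, str],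
--     chiave_tutti: str,
--     prefisso: str = "",
-- ) -> List[str]:
--     # Build the list of values to toggle, then run ONE collective toggle.
--     if data_key == chiave_tutti:
--         valori = [prefisso + v for k, v in dizionario.items() if k != chiave_tutti]
--     else:
--         valori = [prefisso + dizionario[data_key]]
--
--     if all(v in lista_target for v in valori):
--         # all present: drop, in one pass, the first occurrences covered by a multiplicity budget
--         cnt = {}
--         for v in valori:
--             cnt[v] = cnt.get(v, 0) + 1
--         nuovo = []
--         for x in lista_target:
--             if cnt.get(x, 0) > 0:
--                 cnt[x] = cnt[x] - 1
--             else: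
--                 nuovo.append(x)
--     else:
--         # not all present: append each missing value once
--         presenti = set(lista_target)
--         nuovo = list(lista_target)
--         for v in valori:
--             if v not in presenti:
--                 nuovo.append(v)
--                 presenti.add(v)
--
--     lista_target[:] = nuovo
--     return lista_target
-- ===== Notes on version B (the rewrite author's own statement) =====
-- stated objective: alternative
-- what changed: B collapses A's two toggle branches into one collective toggle over a computed value list, replacing A's repeated guarded list.remove scans with a single counted pass over lista_target and the membership-tested append loop with a companion set.
import Mathlib
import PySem

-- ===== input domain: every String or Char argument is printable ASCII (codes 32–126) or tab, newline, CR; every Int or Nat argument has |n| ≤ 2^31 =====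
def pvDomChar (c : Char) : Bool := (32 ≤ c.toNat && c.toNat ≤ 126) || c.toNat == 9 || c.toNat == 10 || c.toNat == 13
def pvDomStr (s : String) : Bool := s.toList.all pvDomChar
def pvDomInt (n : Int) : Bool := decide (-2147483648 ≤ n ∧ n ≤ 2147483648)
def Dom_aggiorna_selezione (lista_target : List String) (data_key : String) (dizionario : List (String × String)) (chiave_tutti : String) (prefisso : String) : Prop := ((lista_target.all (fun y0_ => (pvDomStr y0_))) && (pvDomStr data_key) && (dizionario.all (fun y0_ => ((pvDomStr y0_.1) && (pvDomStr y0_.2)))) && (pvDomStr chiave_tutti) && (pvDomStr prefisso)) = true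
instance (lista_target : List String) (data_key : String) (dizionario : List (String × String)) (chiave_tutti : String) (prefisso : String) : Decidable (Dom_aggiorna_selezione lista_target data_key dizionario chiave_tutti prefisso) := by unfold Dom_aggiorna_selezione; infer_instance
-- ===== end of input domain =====

-- B merges A's two toggle branches into one collective toggle over a value list and replaces the
-- repeated guarded `.remove` scans by a single counted pass (objective: alternative decomposition).
-- A mutates lista_target in place; the equivalence proved here is about the RETURN value only
-- (the Python B performs the same net mutation via `lista_target[:] = nuovo`).

-- ===== PORT A =====
def aggiorna_selezione (lista_target : List String) (data_key : String) (dizionario : List (String × String)) (chiave_tutti : String) (prefisso : String) : List String :=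
  let d := PySem.Dict.ofList dizionario
  if data_key == chiave_tutti then
    let tutti_i_valori := d.items.foldl (fun acc kv =>
      if kv.1 == chiave_tutti then acc
      else acc ++ [if prefisso ≠ "" then prefisso ++ kv.2 else kv.2]) []
    let elementi_gia_presenti := tutti_i_valori.filter (fun x => lista_target.contains x)
    if elementi_gia_presenti.length == tutti_i_valori.length then
      tutti_i_valori.foldl (fun lt item =>
        if lt.contains item then (PySem.List.remove? lt item).getD lt else lt) lista_target
    else
      tutti_i_valori.foldl (fun lt item =>
        if !lt.contains item then lt ++ [item] else lt) lista_target
  else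
    match d.get? data_key with
    | none => lista_target  -- Python raises KeyError here; excluded by Pre_
    | some v =>
      let valore := if prefisso ≠ "" then prefisso ++ v else v
      if lista_target.contains valore then (PySem.List.remove? lista_target valore).getD lista_target
      else lista_target ++ [valore]

-- ===== PORT B =====
def aggiorna_selezione_alt (lista_target : List String) (data_key : String) (dizionario : List (String × String)) (chiave_tutti : String) (prefisso : String) : List String :=
  let d := PySem.Dict.ofList dizionario
  let valori? : Option (List String) :=
    if data_key == chiave_tutti then
      some ((d.items.filter (fun kv => kv.1 != chiave_tutti)).map (fun kv => prefisso ++ kv.2))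
    else (d.get? data_key).map (fun v => [prefisso ++ v])
  match valori? with
  | none => lista_target  -- Python raises KeyError here; excluded by Pre_
  | some valori =>
    if valori.all (fun v => lista_target.contains v) then
      let cnt := valori.foldl (fun c v => c.insert v (c.getD v 0 + 1)) (PySem.Dict.empty : PySem.Dict String Int)
      (lista_target.foldl (fun (s : PySem.Dict String Int × List String) x =>
        if s.1.getD x 0 > 0 then (s.1.insert x (s.1.getD x 0 - 1), s.2)
        else (s.1, s.2 ++ [x])) (cnt, ([] : List String))).2
    else
      (valori.foldl (fun (s : PySem.Set String × List String) v =>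
        if !PySem.Set.contains s.1 v then (PySem.Set.add s.1 v, s.2 ++ [v])
        else s) (PySem.Set.ofList lista_target, lista_target)).2

-- ===== PRECONDITION & SPEC =====
-- Pre_ excludes exactly the KeyError inputs: data_key neither equal to chiave_tutti nor a key of dizionario.
def Pre_aggiorna_selezione (lista_target : List String) (data_key : String) (dizionario : List (String × String)) (chiave_tutti : String) (prefisso : String) : Prop :=
  data_key = chiave_tutti ∨ data_key ∈ dizionario.map (·.1)
instance (lista_target : List String) (data_key : String) (dizionario : List (String × String)) (chiave_tutti : String) (prefisso : String) : Decidable (Pre_aggiorna_selezione lista_target data_key dizionario chiave_tutti prefisso) := by unfold Pre_aggiorna_selezione; infer_instance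
def pvWitness_aggiorna_selezione : List String × String × (List (String × String)) × String × String :=
  (["p:a", "z"], "ALL", [("ALL", "all"), ("a", "a"), ("b", "b")], "ALL", "p:")

def Spec_aggiorna_selezione (lista_target : List String) (data_key : String) (dizionario : List (String × String)) (chiave_tutti : String) (prefisso : String) (out : List String) : Prop := out = aggiorna_selezione_alt lista_target data_key dizionario chiave_tutti prefisso
instance (lista_target : List String) (data_key : String) (dizionario : List (String × String)) (chiave_tutti : String) (prefisso : String) (out : List String) : Decidable (Spec_aggiorna_selezione lista_target data_key dizionario chiave_tutti prefisso out) := by unfold Spec_aggiorna_selezione; infer_instance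

-- ===== CLAIM (what is proved, stated in full; the proofs are below) =====
def Claim_equal_aggiorna_selezione : Prop := ∀ (lista_target : List String) (data_key : String) (dizionario : List (String × String)) (chiave_tutti : String) (prefisso : String), Dom_aggiorna_selezione lista_target data_key dizionario chiave_tutti prefisso → Pre_aggiorna_selezione lista_target data_key dizionario chiave_tutti prefisso → Spec_aggiorna_selezione lista_target data_key dizionario chiave_tutti prefisso (aggiorna_selezione lista_target data_key dizionario chiave_tutti prefisso)

-- ===== LEMMAS AND PROOFS =====

-- prefix formatting: the conditional f-string is plain concatenation
theorem pref_eq (p v : String) : (if p ≠ "" then p ++ v else v) = p ++ v := by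
  split_ifs with h
  · rfl
  · simp at h; subst h; exact String.empty_append.symm

-- A's guarded remove step is List.erase
theorem erase_step (lt : List String) (v : String) :
    (if lt.contains v then (PySem.List.remove? lt v).getD lt else lt) = lt.erase v := by
  by_cases h : v ∈ lt
  · rw [if_pos (by simpa using h), PySem.List.remove?_eq_some_erase (xs := lt) (v := v) h]
    rfl
  · rw [if_neg (by simpa using h), List.erase_of_not_mem h]

-- the counted one-pass drop, as a function of the count budget
def scanF (f : String → Int) : List String → List String
  | [] => []
  | x :: t => if f x > 0 then scanF (fun d => if d = x then f d - 1 else f d) t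
              else x :: scanF f t

theorem scanF_congr (f g : String → Int) (h : f = g) (lt : List String) : scanF f lt = scanF g lt := by rw [h]

theorem scan_foldl (lt : List String) (c : PySem.Dict String Int) (acc : List String) :
    (lt.foldl (fun (s : PySem.Dict String Int × List String) x =>
        if s.1.getD x 0 > 0 then (s.1.insert x (s.1.getD x 0 - 1), s.2)
        else (s.1, s.2 ++ [x])) (c, acc)).2
      = acc ++ scanF (fun d => c.getD d 0) lt := by
  induction lt generalizing c acc with
  | nil => simp [scanF]
  | cons x t ih =>
    by_cases h : c.getD x 0 > 0
    · rw [List.foldl_cons, if_pos h]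
      rw [ih, scanF, if_pos h]
      congr 1
      apply scanF_congr
      funext d
      rw [PySem.Dict.getD_insert]
      split_ifs with hd
      · subst hd; rfl
      · rfl
    · rw [List.foldl_cons, if_neg h]
      rw [ih, scanF, if_neg h]
      simp

theorem scan_bump (lt : List String) (f : String → Int) (v : String) (hf : ∀ d, 0 ≤ f d) :
    scanF (fun d => if d = v then f d + 1 else f d) lt = scanF f (lt.erase v) := by
  induction lt generalizing f with
  | nil => simp [scanF]
  | cons x t ih =>
    by_cases hxv : x = v
    · subst hxv
      rw [scanF, if_pos (by simp; linarith [hf x])]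
      rw [List.erase_cons_head]
      apply scanF_congr
      funext d
      by_cases hd : d = x <;> simp [hd]
    · rw [List.erase_cons_tail (by simpa using hxv)]
      by_cases h : f x > 0
      · rw [scanF, if_pos (by simp [hxv]; exact h)]
        rw [scanF, if_pos h]
        have : (fun d => if d = x then (if d = v then f d + 1 else f d) - 1 else (if d = v then f d + 1 else f d))
             = (fun d => if d = v then (fun e => if e = x then f e - 1 else f e) d + 1 else (fun e => if e = x then f e - 1 else f e) d) := by
          funext d
          have hvx : ¬ v = x := fun hh => hxv hh.symm
          by_cases hdx : d = x
          · subst hdx; simp [hxv]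
          · by_cases hdv : d = v <;> simp [hdx, hdv, hvx]
        rw [this]
        rw [ih (fun e => if e = x then f e - 1 else f e) (fun d => by
          by_cases hdx : d = x
          · subst hdx; simp; omega
          · simpa [hdx] using hf d)]
      · rw [scanF, if_neg (by simp [hxv]; omega)]
        rw [scanF, if_neg h]
        rw [ih f hf]

theorem scanF_zero (lt : List String) : scanF (fun _ => (0 : Int)) lt = lt := by
  induction lt with
  | nil => rfl
  | cons x t ih => rw [scanF, if_neg (by omega)]; rw [ih]

theorem foldl_erase_eq_scan (vs lt : List String) :
    vs.foldl (fun l v => l.erase v) lt = scanF (fun d => (vs.count d : Int)) lt := by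
  induction vs generalizing lt with
  | nil => simp [scanF_zero]
  | cons v vs ih =>
    rw [List.foldl_cons, ih]
    rw [← scan_bump lt (fun d => (vs.count d : Int)) v (fun d => by positivity)]
    apply scanF_congr
    funext d
    by_cases hd : d = v
    · subst hd; simp
    · simp [hd, Ne.symm hd]

-- the append pass with a companion membership set equals the membership-tested append pass
theorem append_fold (vs : List String) (s : PySem.Set String) (acc : List String)
    (hinv : ∀ x, x ∈ s ↔ x ∈ acc) :
    (vs.foldl (fun (st : PySem.Set String × List String) v =>
        if !PySem.Set.contains st.1 v then (PySem.Set.add st.1 v, st.2 ++ [v]) else st) (s, acc)).2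
      = vs.foldl (fun lt item => if !lt.contains item then lt ++ [item] else lt) acc := by
  induction vs generalizing s acc with
  | nil => rfl
  | cons v vs ih =>
    have hc : PySem.Set.contains s v = acc.contains v := by
      by_cases h : v ∈ acc
      · have h1 : PySem.Set.contains s v = true := (PySem.Set.contains_iff s v).mpr ((hinv v).mpr h)
        have h2 : acc.contains v = true := by simpa using h
        rw [h1, h2]
      · have h1 : PySem.Set.contains s v = false := by
          by_contra hne
          exact h ((hinv v).mp ((PySem.Set.contains_iff s v).mp (by simpa using hne)))
        have h2 : acc.contains v = false := by simpa using h
        rw [h1, h2]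
    rw [List.foldl_cons, List.foldl_cons, hc]
    by_cases h : acc.contains v = true
    · simp only [h, Bool.not_true, Bool.false_eq_true, if_false]
      exact ih s acc hinv
    · have h' : acc.contains v = false := by simpa using h
      simp only [h', Bool.not_false, if_true]
      apply ih
      intro x
      rw [PySem.Set.mem_add]
      constructor
      · rintro (hx | hx)
        · exact List.mem_append_left _ ((hinv x).mp hx)
        · subst hx; simp
      · intro hx
        rcases List.mem_append.mp hx with hx | hx
        · exact Or.inl ((hinv x).mpr hx)
        · simp at hx; subst hx; exact Or.inr rfl

-- A's accumulation of tutti_i_valori is B's filter-map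
theorem tutti_eq (items : List (String × String)) (k p : String) :
    items.foldl (fun acc kv => if kv.1 == k then acc
      else acc ++ [if p ≠ "" then p ++ kv.2 else kv.2]) []
    = (items.filter (fun kv => kv.1 != k)).map (fun kv => p ++ kv.2) := by
  have h : ∀ (acc : List String) (kv : String × String),
      (if kv.1 == k then acc else acc ++ [if p ≠ "" then p ++ kv.2 else kv.2])
      = (if kv.1 != k then acc ++ [p ++ kv.2] else acc) := by
    intro acc kv
    rw [pref_eq]
    by_cases h : kv.1 = k <;> simp [h]
  rw [PySem.List.foldl_congr_mem items _ (fun acc kv => if (kv.1 != k) = true then acc ++ [p ++ kv.2] else acc) [] (fun acc kv _ => h acc kv)]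
  simpa using PySem.List.foldl_append_if (fun kv => kv.1 != k) (fun kv => p ++ kv.2) (l := items) (acc := [])

-- B's counted removal pass over any value list vs equals A's repeated erase
theorem removal_eq (vs lt : List String) :
    (lt.foldl (fun (s : PySem.Dict String Int × List String) x =>
        if s.1.getD x 0 > 0 then (s.1.insert x (s.1.getD x 0 - 1), s.2)
        else (s.1, s.2 ++ [x]))
      (vs.foldl (fun c v => c.insert v (c.getD v 0 + 1)) (PySem.Dict.empty : PySem.Dict String Int), ([] : List String))).2
    = vs.foldl (fun l v => l.erase v) lt := by
  rw [scan_foldl, foldl_erase_eq_scan]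
  simp only [List.nil_append]
  apply scanF_congr
  funext d
  rw [PySem.Dict.getD_foldl_insert_add_one]
  simp

-- the non-tutti lookup succeeds iff data_key is among dizionario's keys
theorem get?_foldl_insert_none (l : List (String × String)) (d : PySem.Dict String String) (k : String) :
    (l.foldl (fun d p => d.insert p.1 p.2) d).get? k = none ↔ d.get? k = none ∧ k ∉ l.map (·.1) := by
  induction l generalizing d with
  | nil => simp
  | cons p t ih =>
    rw [List.foldl_cons, ih, PySem.Dict.get?_insert]
    by_cases hk : k = p.1 <;> simp [hk]

theorem get?_ofList_none_iff (l : List (String × String)) (k : String) :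
    (PySem.Dict.ofList l).get? k = none ↔ k ∉ l.map (·.1) := by
  have h : PySem.Dict.ofList l = l.foldl (fun d p => d.insert p.1 p.2) PySem.Dict.empty := rfl
  rw [h, get?_foldl_insert_none]
  simp [PySem.Dict.get?_empty]

-- ===== VERDICT (by name: the statement is the Claim_ definition above) =====
theorem aggiorna_selezione_spec : Claim_equal_aggiorna_selezione := by
  intro lt dk dz kt pf _ hPre
  unfold Spec_aggiorna_selezione aggiorna_selezione aggiorna_selezione_alt
  by_cases hk : (dk == kt) = true
  · -- the chiave_tutti branch: collective toggle over all other values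
    simp only [hk, if_true]
    rw [tutti_eq (PySem.Dict.ofList dz).items kt pf]
    set vs := ((PySem.Dict.ofList dz).items.filter (fun kv => kv.1 != kt)).map (fun kv => pf ++ kv.2) with hvs
    have hcond : (((vs.filter (fun x => lt.contains x)).length == vs.length) = true)
        ↔ (vs.all (fun v => lt.contains v) = true) := by
      rw [beq_iff_eq, List.length_filter_eq_length_iff, List.all_eq_true]
    by_cases hall : vs.all (fun v => lt.contains v) = true
    · rw [if_pos (hcond.mpr hall), if_pos hall]
      rw [PySem.List.foldl_congr_mem vs _ (fun l v => l.erase v) lt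
        (fun acc v _ => erase_step acc v)]
      exact (removal_eq vs lt).symm
    · rw [if_neg (fun hh => hall (hcond.mp hh)), if_neg hall]
      exact (append_fold vs (PySem.Set.ofList lt) lt
        (fun x => by rw [PySem.Set.mem_ofList])).symm
  · -- the single-key branch
    simp only [hk, if_false, Bool.false_eq_true]
    have hmem : dk ∈ dz.map (·.1) := by
      rcases hPre with h | h
      · exact absurd (beq_iff_eq.mpr h) (by simpa using hk)
      · exact h
    obtain ⟨v, hv⟩ : ∃ v, (PySem.Dict.ofList dz).get? dk = some v := by
      rcases ho : (PySem.Dict.ofList dz).get? dk with _ | v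
      · exact absurd ((get?_ofList_none_iff dz dk).mp ho) (by simpa using hmem)
      · exact ⟨v, rfl⟩
    rw [hv]
    simp only [Option.map_some]
    rw [pref_eq pf v]
    by_cases hc : lt.contains (pf ++ v) = true
    · have h1 := erase_step lt (pf ++ v)
      rw [if_pos hc] at h1
      rw [if_pos hc, if_pos (by simpa using hc), h1, removal_eq [pf ++ v] lt]
      simp
    · rw [if_neg hc, if_neg (by simpa using hc)]
      rw [append_fold [pf ++ v] (PySem.Set.ofList lt) lt
        (fun x => by rw [PySem.Set.mem_ofList])]
      simp only [List.foldl_cons, List.foldl_nil]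
      rw [if_pos (by simpa using hc)]
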